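-- pv_equiv track=rewrite | github.com/Incantatoric/llm_elicited_predictor | src/hanwha_predictor/data/mvp_news_collector.py | _parse_news_from_text
-- ===== SOURCE A (Python) =====
-- from typing import List, Dict
--
-- def _parse_news_from_text(text: str, period: str) -> List[Dict]:
--     """Parse news items from text response."""
--     news_items = []
--
--     # Split by potential news separators
--     lines = text.split('\n')
--     current_item = {}
--
--     for line in lines:
--         line = line.strip()
--
--         # Look for patterns that indicate news items
--         if any(keyword in line.lower() for keyword in ['title:', 'headline:', 'news:', 'article:']):
--             # Save previous item if exists
--             if current_item:
--                 current_item['period'] = period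
--                 news_items.append(current_item)
--
--             # Start new item
--             current_item = {
--                 'title': line.split(':', 1)[1].strip() if ':' in line else line,
--                 'date': '',
--                 'source': '',
--                 'url': '',
--                 'summary': '',
--                 'period': period
--             }
--
--         elif 'date:' in line.lower() or 'published:' in line.lower():
--             if current_item:
--                 current_item['date'] = line.split(':', 1)[1].strip() if ':' in line else line
--
--         elif 'source:' in line.lower() or 'url:' in line.lower():
--             if current_item:
--                 current_item['source'] = line.split(':', 1)[1].strip() if ':' in line else line
--
--         elif 'summary:' in line.lower() or 'description:' in line.lower():
--             if current_item:
--                 current_item['summary'] = line.split(':', 1)[1].strip() if ':' in line else line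
--
--         elif line and current_item and not any(keyword in line.lower() for keyword in ['title:', 'date:', 'source:', 'summary:']):
--             # This might be additional summary text
--             if current_item.get('summary'):
--                 current_item['summary'] += ' ' + line
--             else:
--                 current_item['summary'] = line
--
--     # Add the last item
--     if current_item:
--         current_item['period'] = period
--         news_items.append(current_item)
--
--     return news_items
-- ===== SOURCE B (Python) =====
-- from typing import List, Dict
--
-- def _parse_news_from_text(text: str, period: str) -> List[Dict]:
--     """Two-pass rewrite: cut the stripped lines into title-led segments, then build each item."""
--
--     def is_title(line):
--         low = line.lower()
--         return ('title:' in low or 'headline:' in low or 'news:' in low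
--                 or 'article:' in low)
--
--     def value_of(line):
--         return line.split(':', 1)[1].strip() if ':' in line else line
--
--     lines = [raw.strip() for raw in text.split('\n')]
--
--     # Pass 1: segments start at a title line; lines before the first title are dropped.
--     segments = []
--     for line in lines:
--         if is_title(line):
--             segments.append([line])
--         elif segments:
--             segments[-1].append(line)
--
--     # Pass 2: one item per segment.
--     def build(segment):
--         item = {
--             'title': value_of(segment[0]),
--             'date': '',
--             'source': '',
--             'url': '',
--             'summary': '',
--             'period': period,
--         }
--         for line in segment[1:]:
--             low = line.lower()
--             if 'date:' in low or 'published:' in low: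
--                 item['date'] = value_of(line)
--             elif 'source:' in low or 'url:' in low:
--                 item['source'] = value_of(line)
--             elif 'summary:' in low or 'description:' in low:
--                 item['summary'] = value_of(line)
--             elif line:
--                 item['summary'] = item['summary'] + ' ' + line if item['summary'] else line
--         return item
--
--     return [build(seg) for seg in segments]
-- ===== Notes on version B (the rewrite author's own statement) =====
-- stated objective: alternative
-- what changed: A's single stateful loop carrying a current-item dict is re-decomposed into two passes: first segment the stripped lines at title/headline/news/article header lines (dropping pre-title lines), then build one item dict per segment.
import Mathlib
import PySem

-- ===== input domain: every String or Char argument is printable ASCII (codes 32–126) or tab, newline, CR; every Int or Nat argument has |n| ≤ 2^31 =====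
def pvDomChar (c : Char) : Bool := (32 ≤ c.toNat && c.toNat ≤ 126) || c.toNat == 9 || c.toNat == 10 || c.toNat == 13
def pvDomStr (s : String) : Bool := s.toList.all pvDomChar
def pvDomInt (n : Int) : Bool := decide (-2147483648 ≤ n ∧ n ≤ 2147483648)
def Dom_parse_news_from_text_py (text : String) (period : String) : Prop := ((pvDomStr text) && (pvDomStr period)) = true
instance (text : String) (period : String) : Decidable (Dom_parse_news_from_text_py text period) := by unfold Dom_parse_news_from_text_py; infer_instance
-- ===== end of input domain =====

-- B re-decomposes A's single stateful loop into two passes (segment the lines at title headers, then build one item per segment); same return value, objective: alternative decomposition.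

-- ===== PORT A =====
-- shared helper: the expression  line.split(':', 1)[1].strip() if ':' in line else line  (identical in both Pythons)
def pvVal (line : String) : String :=
  if PySem.Str.isIn ":" line then
    PySem.Str.strip (PySem.List.pyGetD ((PySem.Str.splitMax? line ":" 1).getD []) 1 "")
  else line

-- the dict literal A creates at a title line (B's build starts from the same literal)
def pvBase (period : String) (line : String) : PySem.Dict String String :=
  PySem.Dict.mk [("title", pvVal line), ("date", ""), ("source", ""), ("url", ""),
                 ("summary", ""), ("period", period)]

-- A's loop body, acting on an already-stripped line ('line = line.strip()' is applied at the call site)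
def pvStepA (period : String)
    (st : List (List (String × String)) × PySem.Dict String String) (line : String) :
    List (List (String × String)) × PySem.Dict String String :=
  if PySem.Str.isIn "title:" (PySem.Str.lower line) || PySem.Str.isIn "headline:" (PySem.Str.lower line) ||
     PySem.Str.isIn "news:" (PySem.Str.lower line) || PySem.Str.isIn "article:" (PySem.Str.lower line) then
    (if st.2.items = [] then st.1 else st.1 ++ [(st.2.insert "period" period).items],
     pvBase period line)
  else if PySem.Str.isIn "date:" (PySem.Str.lower line) || PySem.Str.isIn "published:" (PySem.Str.lower line) then
    (st.1, if st.2.items = [] then st.2 else st.2.insert "date" (pvVal line))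
  else if PySem.Str.isIn "source:" (PySem.Str.lower line) || PySem.Str.isIn "url:" (PySem.Str.lower line) then
    (st.1, if st.2.items = [] then st.2 else st.2.insert "source" (pvVal line))
  else if PySem.Str.isIn "summary:" (PySem.Str.lower line) || PySem.Str.isIn "description:" (PySem.Str.lower line) then
    (st.1, if st.2.items = [] then st.2 else st.2.insert "summary" (pvVal line))
  else if line ≠ "" ∧ st.2.items ≠ [] ∧
      (PySem.Str.isIn "title:" (PySem.Str.lower line) || PySem.Str.isIn "date:" (PySem.Str.lower line) ||
       PySem.Str.isIn "source:" (PySem.Str.lower line) || PySem.Str.isIn "summary:" (PySem.Str.lower line)) = false then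
    (st.1, if st.2.getD "summary" "" ≠ "" then
             st.2.insert "summary" (st.2.getD "summary" "" ++ " " ++ line)
           else st.2.insert "summary" line)
  else st

-- the trailing  if current_item: current_item['period'] = period; news_items.append(...)
def pvFinalize (period : String)
    (st : List (List (String × String)) × PySem.Dict String String) :
    List (List (String × String)) :=
  if st.2.items = [] then st.1 else st.1 ++ [(st.2.insert "period" period).items]

def parse_news_from_text_py (text : String) (period : String) : List (List (String × String)) :=
  pvFinalize period
    (((PySem.Str.split? text "\n").getD []).foldl (fun st raw => pvStepA period st (PySem.Str.strip raw))
      ([], PySem.Dict.mk []))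

-- ===== PORT B =====
def pvIsTitle (line : String) : Bool :=
  PySem.Str.isIn "title:" (PySem.Str.lower line) || PySem.Str.isIn "headline:" (PySem.Str.lower line) ||
  PySem.Str.isIn "news:" (PySem.Str.lower line) || PySem.Str.isIn "article:" (PySem.Str.lower line)

-- pass 1: cut stripped lines into title-led segments
def pvSegStep (segs : List (List String)) (line : String) : List (List String) :=
  if pvIsTitle line then segs ++ [[line]]
  else if segs.isEmpty then segs
  else segs.dropLast ++ [segs.getLastD [] ++ [line]]

-- pass 2 inner loop body
def pvBuildStep (d : PySem.Dict String String) (line : String) : PySem.Dict String String :=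
  if PySem.Str.isIn "date:" (PySem.Str.lower line) || PySem.Str.isIn "published:" (PySem.Str.lower line) then
    d.insert "date" (pvVal line)
  else if PySem.Str.isIn "source:" (PySem.Str.lower line) || PySem.Str.isIn "url:" (PySem.Str.lower line) then
    d.insert "source" (pvVal line)
  else if PySem.Str.isIn "summary:" (PySem.Str.lower line) || PySem.Str.isIn "description:" (PySem.Str.lower line) then
    d.insert "summary" (pvVal line)
  else if line ≠ "" then
    if d.getD "summary" "" ≠ "" then d.insert "summary" (d.getD "summary" "" ++ " " ++ line)
    else d.insert "summary" line
  else d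

def pvBuild (period : String) (seg : List String) : List (String × String) :=
  match seg with
  | [] => []      -- unreachable: segments are never empty
  | h :: t => (t.foldl pvBuildStep (pvBase period h)).items

def parse_news_from_text_py_alt (text : String) (period : String) : List (List (String × String)) :=
  ((((PySem.Str.split? text "\n").getD []).map PySem.Str.strip).foldl pvSegStep []).map (pvBuild period)

-- ===== PRECONDITION & SPEC =====
def Spec_parse_news_from_text_py (text : String) (period : String) (out : List (List (String × String))) : Prop := out = parse_news_from_text_py_alt text period
instance (text : String) (period : String) (out : List (List (String × String))) : Decidable (Spec_parse_news_from_text_py text period out) := by unfold Spec_parse_news_from_text_py; infer_instance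

-- ===== CLAIM (what is proved, stated in full; the proofs are below) =====
def Claim_equal_parse_news_from_text_py : Prop := ∀ (text : String) (period : String), Dom_parse_news_from_text_py text period → Spec_parse_news_from_text_py text period (parse_news_from_text_py text period)

-- ===== LEMMAS AND PROOFS =====

-- invariant of the item dict: it contains "period", and every "period" entry carries `period`
def pvInv (period : String) (d : PySem.Dict String String) : Prop :=
  d.contains "period" = true ∧ ∀ p ∈ d.items, p.1 = "period" → p.2 = period

lemma pvInv_base (period line : String) : pvInv period (pvBase period line) := by
  constructor
  · simp [pvBase, PySem.Dict.contains]
  · intro p hp h1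
    simp [pvBase] at hp
    rcases hp with rfl | rfl | rfl | rfl | rfl | rfl <;> simp_all

lemma pvInv_insert {period : String} {d : PySem.Dict String String}
    (h : pvInv period d) (k v : String) (hk : k ≠ "period") :
    pvInv period (d.insert k v) := by
  constructor
  · rw [PySem.Dict.contains_insert]
    simp [h.1]
  · intro p hp h1
    rcases (PySem.Dict.mem_items_insert d k v p).1 hp with he | ⟨hm, hne⟩
    · subst he; simp_all
    · exact h.2 p hm h1

lemma pvInv_buildStep {period : String} {d : PySem.Dict String String}
    (h : pvInv period d) (line : String) : pvInv period (pvBuildStep d line) := by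
  unfold pvBuildStep
  split_ifs <;> first
    | exact h
    | exact pvInv_insert h _ _ (by decide)

lemma pvInv_fold {period : String} (t : List String) :
    ∀ {d : PySem.Dict String String}, pvInv period d → pvInv period (t.foldl pvBuildStep d) := by
  induction t with
  | nil => intro d h; exact h
  | cons l t ih => intro d h; exact ih (pvInv_buildStep h l)

lemma items_ne_nil_of_pvInv {period : String} {d : PySem.Dict String String}
    (h : pvInv period d) : d.items ≠ [] := by
  intro he
  cases d with
  | mk l =>
    simp only at he
    subst he
    simpa [PySem.Dict.contains] using h.1

lemma insert_period_of_pvInv {period : String} {d : PySem.Dict String String}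
    (h : pvInv period d) : d.insert "period" period = d := by
  apply PySem.Dict.ext
  rw [PySem.Dict.items_insert_of_contains d period h.1]
  have hcong : ∀ p ∈ d.items,
      (if (p.1 == "period") = true then ("period", period) else p) = p := by
    intro p hp
    by_cases hb : p.1 = "period"
    · have hv := h.2 p hp hb
      rw [if_pos (by simp [hb]), ← hv, ← hb]
    · simp [hb]
  rw [List.map_congr_left hcong, List.map_id']

-- on a nonempty item, A's remaining branches compute exactly B's build step
lemma pvStepA_eq_buildStep (period : String) (items : List (List (String × String)))
    (d : PySem.Dict String String) (line : String)
    (hd : d.items ≠ []) (ht : pvIsTitle line = false) :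
    pvStepA period (items, d) line = (items, pvBuildStep d line) := by
  unfold pvIsTitle at ht
  simp only [Bool.or_eq_false_iff] at ht
  obtain ⟨⟨⟨ht1, ht2⟩, ht3⟩, ht4⟩ := ht
  unfold pvStepA pvBuildStep
  split_ifs <;> simp_all

lemma pvStepA_empty (period : String) (items : List (List (String × String))) (line : String)
    (ht : pvIsTitle line = false) :
    pvStepA period (items, PySem.Dict.mk []) line = (items, PySem.Dict.mk []) := by
  unfold pvIsTitle at ht
  simp only [Bool.or_eq_false_iff] at ht
  obtain ⟨⟨⟨ht1, ht2⟩, ht3⟩, ht4⟩ := ht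
  unfold pvStepA
  split_ifs <;> simp_all

lemma pvStepA_title (period : String) (st : List (List (String × String)) × PySem.Dict String String)
    (line : String) (ht : pvIsTitle line = true) :
    pvStepA period st line =
      (if st.2.items = [] then st.1 else st.1 ++ [(st.2.insert "period" period).items],
       pvBase period line) := by
  unfold pvIsTitle at ht
  unfold pvStepA
  rw [if_pos ht]

lemma pvCore (period : String) (rest : List String) :
    ∀ (segs0 : List (List String)) (h : String) (t : List String),
    pvFinalize period
      (rest.foldl (pvStepA period)
        (segs0.map (pvBuild period), t.foldl pvBuildStep (pvBase period h)))
    = (rest.foldl pvSegStep (segs0 ++ [h :: t])).map (pvBuild period) := by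
  induction rest with
  | nil =>
    intro segs0 h t
    have hi : pvInv period (t.foldl pvBuildStep (pvBase period h)) :=
      pvInv_fold t (pvInv_base period h)
    simp only [List.foldl_nil, pvFinalize, if_neg (items_ne_nil_of_pvInv hi),
      insert_period_of_pvInv hi, List.map_append, List.map_cons, List.map_nil]
    rfl
  | cons l rest ih =>
    intro segs0 h t
    have hi : pvInv period (t.foldl pvBuildStep (pvBase period h)) :=
      pvInv_fold t (pvInv_base period h)
    by_cases htl : pvIsTitle l = true
    · have hstep : pvStepA period
          (segs0.map (pvBuild period), t.foldl pvBuildStep (pvBase period h)) l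
          = ((segs0 ++ [h :: t]).map (pvBuild period), pvBase period l) := by
        rw [pvStepA_title period _ l htl]
        simp [items_ne_nil_of_pvInv hi, insert_period_of_pvInv hi, pvBuild]
      have hseg : pvSegStep (segs0 ++ [h :: t]) l = (segs0 ++ [h :: t]) ++ [[l]] := by
        simp [pvSegStep, htl]
      rw [List.foldl_cons, hstep, List.foldl_cons, hseg]
      have := ih (segs0 ++ [h :: t]) l []
      simpa using this
    · have htl' : pvIsTitle l = false := by simpa using htl
      have hstep := pvStepA_eq_buildStep period (segs0.map (pvBuild period))
        (t.foldl pvBuildStep (pvBase period h)) l (items_ne_nil_of_pvInv hi) htl'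
      have hseg : pvSegStep (segs0 ++ [h :: t]) l = segs0 ++ [h :: (t ++ [l])] := by
        simp [pvSegStep, htl']
      rw [List.foldl_cons, hstep, List.foldl_cons, hseg]
      have hfold : pvBuildStep (t.foldl pvBuildStep (pvBase period h)) l
          = (t ++ [l]).foldl pvBuildStep (pvBase period h) := by
        simp [List.foldl_append]
      rw [hfold]
      exact ih segs0 h (t ++ [l])

lemma pvPre (period : String) (ls : List String) :
    pvFinalize period (ls.foldl (pvStepA period) ([], PySem.Dict.mk []))
    = (ls.foldl pvSegStep []).map (pvBuild period) := by
  induction ls with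
  | nil => rfl
  | cons l ls ih =>
    by_cases htl : pvIsTitle l = true
    · have hstep : pvStepA period ([], PySem.Dict.mk []) l = ([], pvBase period l) := by
        rw [pvStepA_title period _ l htl]
        simp
      have hseg : pvSegStep [] l = [[l]] := by simp [pvSegStep, htl]
      rw [List.foldl_cons, hstep, List.foldl_cons, hseg]
      have := pvCore period ls [] l []
      simpa using this
    · have htl' : pvIsTitle l = false := by simpa using htl
      have hseg : pvSegStep [] l = [] := by simp [pvSegStep, htl']
      rw [List.foldl_cons, pvStepA_empty period [] l htl', List.foldl_cons, hseg]
      exact ih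

-- ===== VERDICT (by name: the statement is the Claim_ definition above) =====
theorem parse_news_from_text_py_spec : Claim_equal_parse_news_from_text_py := by
  intro text period _
  unfold Spec_parse_news_from_text_py parse_news_from_text_py parse_news_from_text_py_alt
  rw [← List.foldl_map]
  exact pvPre period (((PySem.Str.split? text "\n").getD []).map PySem.Str.strip)
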